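-- pv_equiv track=rewrite | github.com/MinG822/programmers-test | 84021_puzzle.py | get_curr_min_max_size
-- ===== SOURCE A (Python) =====
-- from collections import deque
--
-- def get_neighbors(target, visited, i, j, check_value, N):
--     neighbors = []
--     directions = [(-1, 0), (0, -1), (1, 0), (0, 1)]
--     is_in_target = lambda x: (x > -1 and x < N)
--
--     for di, dj in directions:
--         mi, mj = i + di, j + dj
--         if not is_in_target(mi):
--             continue
--         if not is_in_target(mj):
--             continue
--         if visited[mi][mj]:
--             continue
--         if target[mi][mj] != check_value:
--             continue
--         visited[mi][mj] = 1
--         neighbors.append([mi, mj])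
--     return neighbors
--
-- def get_curr_min_max_size(i, j, visited, target, target_value, N):
--     """
--     2차원 리스트 target 에서 i, j 에 위치했을 때,
--     target_value 에 해당하는 구역의 최솟값과 최댓값을 구하는 함수
--
--     param i, j: 주어진 현재 위치
--     param visited: 이제까지 찾은 위치를 1 로 표시한 target 과 같은 크기의 2차원 리스트
--     param target: 찾으려는 대상, 2차원 리스트
--     param target_value: 찾으려는 값
--     param N: target 의 길이
--     return min_i, min_j, max_i, max_j : 찾은 범위의 최솟 값과 최댓값
--     """
--     queue = deque([(i, j)])
--     min_i, min_j, max_i, max_j = i, j, i, j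
--     visited[i][j] = 1
--
--     while queue:
--         curr_i, curr_j = queue.pop()
--         min_i, min_j, max_i, max_j = (
--             min(min_i, curr_i),
--             min(min_j, curr_j),
--             max(max_i, curr_i),
--             max(max_j, curr_j),
--         )
--         neighbors = get_neighbors(target, visited, curr_i, curr_j, target_value, N)
--         for neighbor in neighbors:
--             queue.append((neighbor[0], neighbor[1]))
--     return min_i, min_j, max_i, max_j
-- ===== SOURCE B (Python) =====
-- def get_curr_min_max_size(i, j, visited, target, target_value, N):
--     """Fixed-point label propagation: instead of walking the region with a
--     stack, repeatedly sweep the whole N x N grid and absorb every unvisited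
--     matching cell adjacent to the region, until a sweep adds nothing; then
--     reduce the region to its bounding box.  Mutates visited like the original
--     (each region cell is set to 1)."""
--     region = [(i, j)]
--     in_region = {(i, j)}
--     visited[i][j] = 1
--     grown = True
--     while grown:
--         grown = False
--         for r in range(N):
--             for c in range(N):
--                 if (r, c) in in_region:
--                     continue
--                 if visited[r][c] or target[r][c] != target_value:
--                     continue
--                 if ((r - 1, c) in in_region or (r + 1, c) in in_region
--                         or (r, c - 1) in in_region or (r, c + 1) in in_region):
--                     in_region.add((r, c))
--                     region.append((r, c))
--                     visited[r][c] = 1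
--                     grown = True
--     min_i = min(r for r, c in region)
--     min_j = min(c for r, c in region)
--     max_i = max(r for r, c in region)
--     max_j = max(c for r, c in region)
--     return min_i, min_j, max_i, max_j
-- ===== Notes on version B (the rewrite author's own statement) =====
-- stated objective: alternative
-- what changed: B replaces A's stack-based flood fill with fixed-point label propagation: it repeatedly sweeps the whole N x N grid in row-major order, absorbing every unvisited matching cell adjacent to the current region, until a sweep adds nothing, and then reduces the collected region to its bounding box; it performs the same visited mutations.
-- outside the precondition, e.g. on get_curr_min_max_size(0, 0, [[0, 0], [0]], [[5, 5], [5, 5]], 9, 2): A returns (0, 0, 0, 0), B raises IndexError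
import Mathlib
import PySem

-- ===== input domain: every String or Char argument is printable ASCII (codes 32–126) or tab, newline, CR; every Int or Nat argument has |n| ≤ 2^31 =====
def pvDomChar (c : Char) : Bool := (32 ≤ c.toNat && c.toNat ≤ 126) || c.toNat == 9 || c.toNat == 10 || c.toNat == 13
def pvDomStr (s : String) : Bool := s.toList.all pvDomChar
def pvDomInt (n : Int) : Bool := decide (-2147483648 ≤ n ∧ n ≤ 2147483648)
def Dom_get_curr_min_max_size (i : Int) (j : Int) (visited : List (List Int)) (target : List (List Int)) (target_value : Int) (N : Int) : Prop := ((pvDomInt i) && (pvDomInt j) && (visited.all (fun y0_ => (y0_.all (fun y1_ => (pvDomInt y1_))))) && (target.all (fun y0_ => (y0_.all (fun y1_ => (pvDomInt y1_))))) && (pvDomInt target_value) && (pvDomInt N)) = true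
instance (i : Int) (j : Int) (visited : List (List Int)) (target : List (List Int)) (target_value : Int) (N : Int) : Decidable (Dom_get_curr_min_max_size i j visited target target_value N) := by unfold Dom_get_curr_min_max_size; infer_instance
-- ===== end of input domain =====

-- B replaces the stack flood fill by fixed-point label propagation (whole-grid sweeps until no
-- change) and a final reduction of the collected region to its bounding box (objective: alternative).
-- Both Pythons mutate `visited` in place, marking exactly the same cells; the theorems below are
-- about the return value.

-- ===== PORT A =====
-- visited[r][c] = v with Python's negative-index wraparound; exact wherever Python's assignment succeeds
def pvSet2 (vis : List (List Int)) (r c v : Int) : List (List Int) :=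
  let ri := if r < 0 then r + (vis.length : Int) else r
  if 0 ≤ ri ∧ ri < (vis.length : Int) then
    vis.modify ri.toNat (fun row =>
      let ci := if c < 0 then c + (row.length : Int) else c
      if 0 ≤ ci ∧ ci < (row.length : Int) then row.set ci.toNat v else row)
  else vis

-- module helper get_neighbors (A calls it verbatim); returns (neighbors, mutated visited)
def pvGetNeighbors (target vis : List (List Int)) (i j check_value N : Int) :
    List (Int × Int) × List (List Int) :=
  [((-1 : Int), (0 : Int)), (0, -1), (1, 0), (0, 1)].foldl (fun st d =>
    let mi := i + d.1
    let mj := j + d.2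
    if ¬ (mi > -1 ∧ mi < N) then st
    else if ¬ (mj > -1 ∧ mj < N) then st
    else if PySem.List.pyGetD (PySem.List.pyGetD st.2 mi []) mj 0 ≠ 0 then st
    else if PySem.List.pyGetD (PySem.List.pyGetD target mi []) mj 0 ≠ check_value then st
    else (st.1 ++ [(mi, mj)], pvSet2 st.2 mi mj 1)) ([], vis)

-- A's while loop: stack (deque append/pop right = cons-list head), running 4-scalar bbox.
-- Fuel bounds the iteration count; inside Pre_ the Python loop pops at most N*N+1 cells, so the
-- fuel is never exhausted (proved below: the result is the closure's bounding box).
def pvLoopA (target : List (List Int)) (tv N : Int) :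
    Nat → List (Int × Int) → List (List Int) → Int × Int × Int × Int → Int × Int × Int × Int
  | 0, _, _, acc => acc
  | _ + 1, [], _, acc => acc
  | fuel + 1, (ci, cj) :: rest, vis, (a, b, c, d) =>
      let acc' := (min a ci, min b cj, max c ci, max d cj)
      let r := pvGetNeighbors target vis ci cj tv N
      pvLoopA target tv N fuel (r.1.foldl (fun q n => n :: q) rest) r.2 acc'

def get_curr_min_max_size (i : Int) (j : Int) (visited : List (List Int)) (target : List (List Int)) (target_value : Int) (N : Int) : Int × Int × Int × Int :=
  let visited1 := pvSet2 visited i j 1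
  pvLoopA target target_value N (N.toNat * N.toNat + 1) [(i, j)] visited1 (i, j, i, j)

-- ===== PORT B =====
-- one grid cell of B's sweep; state = (region, visited, grown); membership in the Python set
-- in_region equals membership in the region list (they receive the same elements)
def pvCellStep (target : List (List Int)) (tv : Int)
    (st : List (Int × Int) × List (List Int) × Bool) (r c : Int) :
    List (Int × Int) × List (List Int) × Bool :=
  if (r, c) ∈ st.1 then st
  else if PySem.List.pyGetD (PySem.List.pyGetD st.2.1 r []) c 0 ≠ 0 ∨
          PySem.List.pyGetD (PySem.List.pyGetD target r []) c 0 ≠ tv then st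
  else if (r - 1, c) ∈ st.1 ∨ (r + 1, c) ∈ st.1 ∨ (r, c - 1) ∈ st.1 ∨ (r, c + 1) ∈ st.1 then
    (st.1 ++ [(r, c)], pvSet2 st.2.1 r c 1, true)
  else st

-- one row-major sweep over the N x N grid, grown reset to false
def pvSweep (target : List (List Int)) (tv N : Int)
    (region : List (Int × Int)) (vis : List (List Int)) :
    List (Int × Int) × List (List Int) × Bool :=
  (PySem.List.pyRange 0 N 1).foldl (fun st r =>
    (PySem.List.pyRange 0 N 1).foldl (fun st c => pvCellStep target tv st r c) st)
    (region, vis, false)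

-- B's while-grown loop; each growing sweep adds at least one of the ≤ N*N in-range cells,
-- so the fuel N*N+1 is never exhausted
def pvFixB (target : List (List Int)) (tv N : Int) :
    Nat → List (Int × Int) → List (List Int) → List (Int × Int)
  | 0, region, _ => region
  | fuel + 1, region, vis =>
      let st := pvSweep target tv N region vis
      if st.2.2 then pvFixB target tv N fuel st.1 st.2.1 else st.1

def get_curr_min_max_size_alt (i : Int) (j : Int) (visited : List (List Int)) (target : List (List Int)) (target_value : Int) (N : Int) : Int × Int × Int × Int :=
  let visited1 := pvSet2 visited i j 1
  let region := pvFixB target target_value N (N.toNat * N.toNat + 1) [(i, j)] visited1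
  ((PySem.List.min? (region.map (fun c => c.1)) (fun x => x)).getD 0,
   (PySem.List.min? (region.map (fun c => c.2)) (fun x => x)).getD 0,
   (PySem.List.max? (region.map (fun c => c.1)) (fun x => x)).getD 0,
   (PySem.List.max? (region.map (fun c => c.2)) (fun x => x)).getD 0)

-- ===== PRECONDITION & SPEC =====
-- Pre_ excludes the inputs where either Python raises IndexError: the seed must be a valid
-- (possibly negative) index into visited, and the first N rows of visited and target must exist
-- and hold at least N cells (B scans all of them; A returns on some ragged grids whose short
-- cells its flood fill happens never to probe — that reachability accident is excluded too,
-- see the cite in the claim).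
def Pre_get_curr_min_max_size (i : Int) (j : Int) (visited : List (List Int)) (target : List (List Int)) (target_value : Int) (N : Int) : Prop :=
  (let ri := if i < 0 then i + (visited.length : Int) else i
   let row := visited.getD ri.toNat []
   let cj := if j < 0 then j + (row.length : Int) else j
   0 ≤ ri ∧ ri < (visited.length : Int) ∧ 0 ≤ cj ∧ cj < (row.length : Int)) ∧
  N ≤ (visited.length : Int) ∧ N ≤ (target.length : Int) ∧
  (∀ row ∈ visited.take N.toNat, N ≤ (row.length : Int)) ∧
  (∀ row ∈ target.take N.toNat, N ≤ (row.length : Int))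
instance (i : Int) (j : Int) (visited : List (List Int)) (target : List (List Int)) (target_value : Int) (N : Int) : Decidable (Pre_get_curr_min_max_size i j visited target target_value N) := by unfold Pre_get_curr_min_max_size; infer_instance

def pvWitness_get_curr_min_max_size : Int × Int × List (List Int) × List (List Int) × Int × Int :=
  (0, 1, [[0, 0], [0, 0]], [[5, 5], [3, 5]], 5, 2)

def Spec_get_curr_min_max_size (i : Int) (j : Int) (visited : List (List Int)) (target : List (List Int)) (target_value : Int) (N : Int) (out : Int × Int × Int × Int) : Prop := out = get_curr_min_max_size_alt i j visited target target_value N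
instance (i : Int) (j : Int) (visited : List (List Int)) (target : List (List Int)) (target_value : Int) (N : Int) (out : Int × Int × Int × Int) : Decidable (Spec_get_curr_min_max_size i j visited target target_value N out) := by unfold Spec_get_curr_min_max_size; infer_instance

-- ===== CLAIM (what is proved, stated in full; the proofs are below) =====
def Claim_equal_get_curr_min_max_size : Prop := ∀ (i : Int) (j : Int) (visited : List (List Int)) (target : List (List Int)) (target_value : Int) (N : Int), Dom_get_curr_min_max_size i j visited target target_value N → Pre_get_curr_min_max_size i j visited target target_value N → Spec_get_curr_min_max_size i j visited target target_value N (get_curr_min_max_size i j visited target target_value N)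

-- ===== LEMMAS AND PROOFS =====
-- ===== proof helpers =====
def pvRead (vis : List (List Int)) (p : Int × Int) : Int :=
  PySem.List.pyGetD (PySem.List.pyGetD vis p.1 []) p.2 0

abbrev pvInR (N : Int) (p : Int × Int) : Prop :=
  0 ≤ p.1 ∧ p.1 < N ∧ 0 ≤ p.2 ∧ p.2 < N

def pvShape (N : Int) (vis : List (List Int)) : Prop :=
  N ≤ (vis.length : Int) ∧ ∀ k : Nat, (k : Int) < N → N ≤ ((vis.getD k []).length : Int)

theorem pv_modify_getD_length (l : List (List Int)) (m : Nat) (f : List Int → List Int)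
    (hf : ∀ row, (f row).length = row.length) (k : Nat) :
    ((l.modify m f).getD k []).length = (l.getD k []).length := by
  rw [List.getD_eq_getElem?_getD, List.getD_eq_getElem?_getD, List.getElem?_modify]
  cases h : l[k]? with
  | none => simp
  | some row => by_cases hmk : m = k <;> simp [hmk, hf]

theorem pv_length_pvSet2 (vis : List (List Int)) (r c v : Int) :
    (pvSet2 vis r c v).length = vis.length := by
  unfold pvSet2; dsimp only; split <;> split <;> simp

theorem pv_getD_pvSet2_length (vis : List (List Int)) (r c v : Int) (k : Nat) :
    ((pvSet2 vis r c v).getD k []).length = ((vis.getD k []).length) := by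
  unfold pvSet2; dsimp only
  split <;> split
  · apply pv_modify_getD_length
    intro row; dsimp only; split <;> split <;> simp
  · rfl
  · apply pv_modify_getD_length
    intro row; dsimp only; split <;> split <;> simp
  · rfl

theorem pvShape_pvSet2 {N : Int} {vis : List (List Int)} (h : pvShape N vis) (r c v : Int) :
    pvShape N (pvSet2 vis r c v) := by
  refine ⟨?_, ?_⟩
  · rw [pv_length_pvSet2]; exact h.1
  · intro k hk; rw [pv_getD_pvSet2_length]; exact h.2 k hk

theorem pvRead_pvSet2 {N : Int} {vis : List (List Int)} (hs : pvShape N vis)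
    {x : Int × Int} (hx : pvInR N x) (v : Int) (p : Int × Int)
    (hp1 : 0 ≤ p.1) (hp2 : 0 ≤ p.2) :
    pvRead (pvSet2 vis x.1 x.2 v) p = if p = x then v else pvRead vis p := by
  obtain ⟨hx1, hx2, hx3, hx4⟩ := hx
  obtain ⟨hs1, hs2⟩ := hs
  have hxlen : x.1.toNat < vis.length := by omega
  have hrow : (N : Int) ≤ ((vis.getD x.1.toNat []).length : Int) := hs2 _ (by omega)
  unfold pvSet2 pvRead
  simp only [if_neg (show ¬ x.1 < 0 by omega)]
  rw [if_pos (show 0 ≤ x.1 ∧ x.1 < (vis.length : Int) by constructor <;> omega)]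
  rw [PySem.List.pyGetD_of_nonneg _ _ hp1, PySem.List.pyGetD_of_nonneg _ _ hp1,
      PySem.List.pyGetD_of_nonneg _ _ hp2, PySem.List.pyGetD_of_nonneg _ _ hp2]
  simp only [List.getD_eq_getElem?_getD, List.getElem?_modify]
  by_cases h1 : p.1 = x.1
  · have e : x.1.toNat = p.1.toNat := by omega
    have hplen : p.1.toNat < vis.length := by omega
    have hgd : vis.getD x.1.toNat [] = vis[p.1.toNat] := by
      rw [List.getD_eq_getElem?_getD, e, List.getElem?_eq_getElem hplen]; rfl
    rw [hgd] at hrow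
    simp only [if_pos e, List.getElem?_eq_getElem hplen, Option.map_eq_map, Option.map_some,
      Option.getD_some]
    simp only [if_neg (show ¬ x.2 < 0 by omega)]
    rw [if_pos (show 0 ≤ x.2 ∧ x.2 < ((vis[p.1.toNat] : List Int).length : Int) by
      constructor <;> omega)]
    by_cases h2 : p.2 = x.2
    · have hpx : p = x := Prod.ext h1 h2
      have e2 : x.2.toNat = p.2.toNat := by omega
      rw [if_pos hpx, e2, List.getElem?_set_self (by omega : p.2.toNat < (vis[p.1.toNat] : List Int).length)]
      rfl
    · have hne : p ≠ x := by intro hh; exact h2 (by rw [hh])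
      have hne2 : x.2.toNat ≠ p.2.toNat := by omega
      rw [if_neg hne, List.getElem?_set_ne hne2]
  · have hne : p ≠ x := by intro hh; exact h1 (by rw [hh])
    have e : ¬ (x.1.toNat = p.1.toNat) := by omega
    simp [if_neg e, if_neg hne]

def pvNbr (p : Int × Int) : List (Int × Int) :=
  [(p.1 - 1, p.2), (p.1, p.2 - 1), (p.1 + 1, p.2), (p.1, p.2 + 1)]

abbrev pvOk (target vis : List (List Int)) (tv N : Int) (p : Int × Int) : Prop :=
  pvInR N p ∧ pvRead vis p = 0 ∧ pvRead target p = tv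

def pvMark (target : List (List Int)) (tv N : Int)
    (st : List (Int × Int) × List (List Int)) (p : Int × Int) :
    List (Int × Int) × List (List Int) :=
  if pvOk target st.2 tv N p then (st.1 ++ [p], pvSet2 st.2 p.1 p.2 1) else st

theorem pvNbr_nodup (p : Int × Int) : (pvNbr p).Nodup := by
  simp [pvNbr, Prod.ext_iff]
  omega

theorem pvStep_eq (target : List (List Int)) (cv N : Int)
    (st : List (Int × Int) × List (List Int)) (mi mj : Int) :
    (if ¬ (mi > -1 ∧ mi < N) then st
     else if ¬ (mj > -1 ∧ mj < N) then st
     else if PySem.List.pyGetD (PySem.List.pyGetD st.2 mi []) mj 0 ≠ 0 then st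
     else if PySem.List.pyGetD (PySem.List.pyGetD target mi []) mj 0 ≠ cv then st
     else (st.1 ++ [(mi, mj)], pvSet2 st.2 mi mj 1))
    = pvMark target cv N st (mi, mj) := by
  unfold pvMark pvOk pvInR pvRead
  dsimp only
  by_cases c1 : mi > -1 ∧ mi < N
  case neg =>
    rw [if_pos c1, if_neg (fun hOk => c1 ⟨by omega, by omega⟩)]
  case pos =>
    rw [if_neg (not_not_intro c1)]
    by_cases c2 : mj > -1 ∧ mj < N
    case neg =>
      rw [if_pos c2, if_neg (fun hOk => c2 ⟨by omega, by omega⟩)]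
    case pos =>
      rw [if_neg (not_not_intro c2)]
      by_cases c3 : PySem.List.pyGetD (PySem.List.pyGetD st.2 mi []) mj 0 ≠ 0
      case pos =>
        rw [if_pos c3, if_neg (fun hOk => c3 hOk.2.1)]
      case neg =>
        rw [if_neg c3]
        by_cases c4 : PySem.List.pyGetD (PySem.List.pyGetD target mi []) mj 0 ≠ cv
        case pos =>
          rw [if_pos c4, if_neg (fun hOk => c4 hOk.2.2)]
        case neg =>
          rw [if_neg c4, if_pos ⟨⟨by omega, by omega, by omega, by omega⟩,
            not_ne_iff.mp c3, not_ne_iff.mp c4⟩]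

theorem pvGetNeighbors_eq_fold (target vis : List (List Int)) (i j cv N : Int) :
    pvGetNeighbors target vis i j cv N =
      (pvNbr (i, j)).foldl (pvMark target cv N) ([], vis) := by
  have hmap : pvNbr (i, j) =
      [((-1 : Int), (0 : Int)), (0, -1), (1, 0), (0, 1)].map (fun d => (i + d.1, j + d.2)) := by
    simp only [pvNbr, List.map_cons, List.map_nil, List.cons.injEq, Prod.mk.injEq, and_true]
    refine ⟨⟨by omega, by omega⟩, ⟨by omega, by omega⟩, ⟨trivial, by omega⟩, by omega⟩
  rw [hmap, List.foldl_map]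
  unfold pvGetNeighbors
  apply PySem.List.foldl_congr_mem
  intro st d _
  exact pvStep_eq target cv N st (i + d.1) (j + d.2)

theorem pvMark_fold_spec (target : List (List Int)) (tv N : Int) :
    ∀ (cells : List (Int × Int)), cells.Nodup →
    ∀ (acc : List (Int × Int)) (vis : List (List Int)), pvShape N vis →
      ((cells.foldl (pvMark target tv N) (acc, vis)).1
          = acc ++ cells.filter (fun q => decide (pvOk target vis tv N q))) ∧
      pvShape N (cells.foldl (pvMark target tv N) (acc, vis)).2 ∧
      (∀ p : Int × Int, 0 ≤ p.1 → 0 ≤ p.2 →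
        pvRead (cells.foldl (pvMark target tv N) (acc, vis)).2 p
          = if p ∈ cells.filter (fun q => decide (pvOk target vis tv N q)) then 1
            else pvRead vis p) := by
  intro cells
  induction cells with
  | nil =>
    intro _ acc vis hs
    refine ⟨by simp, by simpa using hs, by intro p _ _; simp⟩
  | cons x t ih =>
    intro hnd acc vis hs
    obtain ⟨hxt, hndt⟩ := List.nodup_cons.mp hnd
    by_cases hOk : pvOk target vis tv N x
    · have hstep : pvMark target tv N (acc, vis) x = (acc ++ [x], pvSet2 vis x.1 x.2 1) := by
        simp [pvMark, hOk]
      have hs' : pvShape N (pvSet2 vis x.1 x.2 1) := pvShape_pvSet2 hs _ _ _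
      have hread' : ∀ p : Int × Int, 0 ≤ p.1 → 0 ≤ p.2 →
          pvRead (pvSet2 vis x.1 x.2 1) p = if p = x then 1 else pvRead vis p :=
        fun p hp1 hp2 => pvRead_pvSet2 hs hOk.1 1 p hp1 hp2
      have hfilt : t.filter (fun q => decide (pvOk target (pvSet2 vis x.1 x.2 1) tv N q))
          = t.filter (fun q => decide (pvOk target vis tv N q)) := by
        apply List.filter_congr
        intro q hq
        by_cases hqInR : pvInR N q
        · have hqx : q ≠ x := fun h => hxt (h ▸ hq)
          simp [pvOk, hread' q hqInR.1 hqInR.2.2.1, hqx]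
        · simp [pvOk, hqInR]
      obtain ⟨ih1, ih2, ih3⟩ := ih hndt (acc ++ [x]) _ hs'
      have hfc : (x :: t).filter (fun q => decide (pvOk target vis tv N q))
          = x :: t.filter (fun q => decide (pvOk target vis tv N q)) := by
        rw [List.filter_cons, if_pos (by simpa using hOk)]
      refine ⟨?_, ?_, ?_⟩
      · rw [List.foldl_cons, hstep, ih1, hfilt, hfc]
        simp
      · rw [List.foldl_cons, hstep]; exact ih2
      · intro p hp1 hp2
        rw [List.foldl_cons, hstep, ih3 p hp1 hp2, hfilt, hfc]
        by_cases hpt : p ∈ t.filter (fun q => decide (pvOk target vis tv N q))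
        · rw [if_pos hpt, if_pos (List.mem_cons_of_mem _ hpt)]
        · rw [if_neg hpt, hread' p hp1 hp2]
          by_cases hpx : p = x
          · rw [if_pos hpx, if_pos (by rw [hpx]; exact List.mem_cons_self)]
          · rw [if_neg hpx, if_neg (fun hm => (List.mem_cons.mp hm).elim hpx hpt)]
    · have hstep : pvMark target tv N (acc, vis) x = (acc, vis) := by
        unfold pvMark; rw [if_neg hOk]
      have hfc : (x :: t).filter (fun q => decide (pvOk target vis tv N q))
          = t.filter (fun q => decide (pvOk target vis tv N q)) := by
        rw [List.filter_cons, if_neg (by simpa using hOk)]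
      obtain ⟨ih1, ih2, ih3⟩ := ih hndt acc vis hs
      refine ⟨?_, ?_, ?_⟩ <;> rw [List.foldl_cons, hstep]
      · rw [ih1, hfc]
      · exact ih2
      · intro p hp1 hp2; rw [ih3 p hp1 hp2, hfc]

def pvGrid (N : Int) : List (Int × Int) :=
  (PySem.List.pyRange 0 N 1).flatMap (fun r => (PySem.List.pyRange 0 N 1).map (fun c => (r, c)))

theorem pv_mem_grid (N : Int) (p : Int × Int) : p ∈ pvGrid N ↔ pvInR N p := by
  simp only [pvGrid, List.mem_flatMap, List.mem_map, PySem.List.mem_pyRange_one, pvInR]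
  constructor
  · rintro ⟨r, ⟨hr1, hr2⟩, c, ⟨hc1, hc2⟩, rfl⟩; exact ⟨hr1, hr2, hc1, hc2⟩
  · rintro ⟨h1, h2, h3, h4⟩; exact ⟨p.1, ⟨h1, h2⟩, p.2, ⟨h3, h4⟩, rfl⟩

theorem pv_grid_length (N : Int) : (pvGrid N).length = N.toNat * N.toNat := by
  simp [pvGrid, List.length_flatMap, PySem.List.length_pyRange_one, List.map_const',
    List.sum_replicate]

theorem pv_grid_nodup (N : Int) : (pvGrid N).Nodup := by
  apply List.nodup_flatMap.mpr
  constructor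
  · intro r _
    exact (PySem.List.nodup_pyRange_one 0 N).map (fun a b h => by
      simpa using congrArg Prod.snd h)
  · apply (PySem.List.nodup_pyRange_one 0 N).imp
    intro a b hab
    simp only [Function.onFun, List.disjoint_left, List.mem_map]
    rintro x ⟨c, _, rfl⟩ ⟨c', _, hx⟩
    have hba : b = a := by simpa using congrArg Prod.fst hx
    exact hab hba.symm

-- flipping the predicate to false on exactly the members of S removes |S| from the filter count
theorem pv_filter_flip {α : Type} [DecidableEq α] (p p' : α → Bool) :
    ∀ (G S : List α), G.Nodup → S.Nodup → (∀ x ∈ S, x ∈ G) → (∀ x ∈ S, p x = true) →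
      (∀ x ∈ G, p' x = if x ∈ S then false else p x) →
      (G.filter p').length + S.length = (G.filter p).length := by
  intro G
  induction G with
  | nil =>
    intro S _ _ hsub _ _
    have : S = [] := List.eq_nil_iff_forall_not_mem.mpr (fun x hx => by simpa using hsub x hx)
    simp [this]
  | cons g G' ih =>
    intro S hGnd hSnd hsub hpS hrel
    obtain ⟨hgG', hG'nd⟩ := List.nodup_cons.mp hGnd
    by_cases hgS : g ∈ S
    · have hpg : p g = true := hpS g hgS
      have hp'g : p' g = false := by rw [hrel g (List.mem_cons_self)]; simp [hgS]
      have hsub' : ∀ x ∈ S.erase g, x ∈ G' := by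
        intro x hx
        have hxS := List.mem_of_mem_erase hx
        have hxg : x ≠ g := by
          intro h; subst h
          exact (List.Nodup.not_mem_erase hSnd) hx
        rcases List.mem_cons.mp (hsub x hxS) with h | h
        · exact absurd h hxg
        · exact h
      have hrel' : ∀ x ∈ G', p' x = if x ∈ S.erase g then false else p x := by
        intro x hx
        have hxg : x ≠ g := fun h => hgG' (h ▸ hx)
        rw [hrel x (List.mem_cons_of_mem _ hx)]
        by_cases hxS : x ∈ S
        · simp [hxS, (List.mem_erase_of_ne hxg).mpr hxS]
        · have hne : x ∉ S.erase g := fun h => hxS (List.mem_of_mem_erase h)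
          simp [hxS, hne]
      have := ih (S.erase g) hG'nd (hSnd.erase g) hsub' (fun x hx => hpS x (List.mem_of_mem_erase hx)) hrel'
      have hlen : (S.erase g).length + 1 = S.length := by
        rw [List.length_erase_of_mem hgS]
        have : S.length ≠ 0 := by
          intro h; rw [List.length_eq_zero_iff] at h; subst h; simp at hgS
        omega
      rw [List.filter_cons, List.filter_cons, hp'g, hpg, if_neg Bool.false_ne_true, if_pos rfl,
        List.length_cons]
      omega
    · have hrel' : ∀ x ∈ G', p' x = if x ∈ S then false else p x :=
        fun x hx => hrel x (List.mem_cons_of_mem _ hx)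
      have hsub' : ∀ x ∈ S, x ∈ G' := by
        intro x hx
        rcases List.mem_cons.mp (hsub x hx) with h | h
        · exact absurd (h ▸ hx) hgS
        · exact h
      have := ih S hG'nd hSnd hsub' hpS hrel'
      have hp'g : p' g = p g := by rw [hrel g (List.mem_cons_self)]; simp [hgS]
      by_cases hpg : p g = true
      · rw [List.filter_cons, List.filter_cons, hp'g, if_pos hpg, if_pos hpg, List.length_cons,
          List.length_cons]
        omega
      · rw [List.filter_cons, List.filter_cons, hp'g, if_neg hpg, if_neg hpg]
        omega

-- proof twin of pvLoopA that records the popped cells instead of the running bbox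
def pvCellsA (target : List (List Int)) (tv N : Int) :
    Nat → List (Int × Int) → List (List Int) → List (Int × Int)
  | 0, _, _ => []
  | _ + 1, [], _ => []
  | fuel + 1, (ci, cj) :: rest, vis =>
      let r := pvGetNeighbors target vis ci cj tv N
      (ci, cj) :: pvCellsA target tv N fuel (r.1.foldl (fun q n => n :: q) rest) r.2

-- A's running bbox over a traversal equals folding the bbox step over the popped-cell list
theorem pvLoopA_eq_fold (target : List (List Int)) (tv N : Int) :
    ∀ (fuel : Nat) (q : List (Int × Int)) (vis : List (List Int)) (a b c d : Int),
      pvLoopA target tv N fuel q vis (a, b, c, d) =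
        (pvCellsA target tv N fuel q vis).foldl
          (fun acc e => (min acc.1 e.1, min acc.2.1 e.2, max acc.2.2.1 e.1, max acc.2.2.2 e.2))
          (a, b, c, d) := by
  intro fuel
  induction fuel with
  | zero => intro q vis a b c d; simp [pvLoopA, pvCellsA]
  | succ n ih =>
      intro q vis a b c d
      cases q with
      | nil => simp [pvLoopA, pvCellsA]
      | cons hd rest =>
          obtain ⟨ci, cj⟩ := hd
          simp only [pvLoopA, pvCellsA, List.foldl_cons]
          exact ih _ _ _ _ _ _

-- the bbox fold computes its four components independently
theorem pvFold_split :
    ∀ (cs : List (Int × Int)) (a b c d : Int),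
      cs.foldl (fun acc e => (min acc.1 e.1, min acc.2.1 e.2, max acc.2.2.1 e.1, max acc.2.2.2 e.2))
          (a, b, c, d) =
        ((cs.map (fun e => e.1)).foldl min a, (cs.map (fun e => e.2)).foldl min b,
         (cs.map (fun e => e.1)).foldl max c, (cs.map (fun e => e.2)).foldl max d) := by
  intro cs
  induction cs with
  | nil => intro a b c d; simp
  | cons e t ih => intro a b c d; simp only [List.foldl_cons, List.map_cons]; exact ih _ _ _ _

theorem pv_foldl_cons_eq {α : Type} : ∀ (l acc : List α),
    l.foldl (fun q n => n :: q) acc = l.reverse ++ acc := by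
  intro l
  induction l with
  | nil => intro acc; simp
  | cons x t ih => intro acc; simp [ih]

-- the loop measure: queue length plus number of unmarked in-range cells
def pvMu (N : Int) (q : List (Int × Int)) (vis : List (List Int)) : Nat :=
  q.length + ((pvGrid N).filter (fun p => pvRead vis p == 0)).length

-- every queued cell is popped, and the popped set is closed under admissible neighbours
theorem pvCellsA_spec (target : List (List Int)) (tv N : Int) :
    ∀ (fuel : Nat) (q : List (Int × Int)) (vis : List (List Int)), pvShape N vis →
      pvMu N q vis ≤ fuel →
      (∀ x ∈ q, x ∈ pvCellsA target tv N fuel q vis) ∧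
      (∀ c' ∈ pvCellsA target tv N fuel q vis, ∀ c ∈ pvNbr c', pvInR N c →
        pvRead target c = tv → pvRead vis c = 0 → c ∈ pvCellsA target tv N fuel q vis) := by
  intro fuel
  induction fuel with
  | zero =>
    intro q vis _ hmu
    have : q = [] := List.eq_nil_of_length_eq_zero (by unfold pvMu at hmu; omega)
    subst this
    simp [pvCellsA]
  | succ n ih =>
    intro q vis hs hmu
    cases q with
    | nil => simp [pvCellsA]
    | cons hd rest =>
      obtain ⟨ci, cj⟩ := hd
      simp only [pvCellsA, pvGetNeighbors_eq_fold]
      set ns := ((pvNbr (ci, cj)).foldl (pvMark target tv N) ([], vis)).1 with hns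
      set vis' := ((pvNbr (ci, cj)).foldl (pvMark target tv N) ([], vis)).2 with hvis'
      obtain ⟨hf1, hf2, hf3⟩ := pvMark_fold_spec target tv N (pvNbr (ci, cj)) (pvNbr_nodup _) [] vis hs
      simp only [List.nil_append] at hf1
      -- the filtered neighbour list
      set F := (pvNbr (ci, cj)).filter (fun q => decide (pvOk target vis tv N q)) with hF
      have hFn : ns = F := hf1
      have hFnodup : F.Nodup := (pvNbr_nodup _).filter _
      have hFok : ∀ x ∈ F, pvOk target vis tv N x := by
        intro x hx
        have := List.of_mem_filter hx
        simpa using this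
      -- measure decreases by one
      have hcount : (((pvGrid N).filter (fun p => pvRead vis' p == 0))).length + F.length
          = ((pvGrid N).filter (fun p => pvRead vis p == 0)).length := by
        apply pv_filter_flip _ _ (pvGrid N) F (pv_grid_nodup N) hFnodup
        · intro x hx
          exact (pv_mem_grid N x).mpr (hFok x hx).1
        · intro x hx
          simp [(hFok x hx).2.1]
        · intro x hx
          have hxr := (pv_mem_grid N x).mp hx
          rw [hf3 x hxr.1 hxr.2.2.1]
          by_cases hmem : x ∈ F <;> simp [hmem]
      have hmu' : pvMu N (ns.foldl (fun q n => n :: q) rest) vis' ≤ n := by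
        unfold pvMu at hmu ⊢
        rw [pv_foldl_cons_eq, hFn]
        simp only [List.length_append, List.length_reverse, List.length_cons] at hmu ⊢
        omega
      obtain ⟨ih1, ih2⟩ := ih (ns.foldl (fun q n => n :: q) rest) vis' hf2 hmu'
      constructor
      · intro x hx
        rcases List.mem_cons.mp hx with h | h
        · simp [h]
        · exact List.mem_cons_of_mem _ (ih1 x (by rw [pv_foldl_cons_eq]; simp [h]))
      · intro c' hc' c hcnbr hcInR hct hcread
        rcases List.mem_cons.mp hc' with h | h
        · -- c' is the popped head
          subst h
          have hcF : c ∈ F := by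
            rw [hF]
            apply List.mem_filter.mpr
            exact ⟨hcnbr, by simp [pvOk, hcInR, hcread, hct]⟩
          apply List.mem_cons_of_mem
          apply ih1
          rw [pv_foldl_cons_eq]
          simp [hFn, hcF]
        · -- c' popped later
          by_cases hcF : c ∈ F
          · apply List.mem_cons_of_mem
            apply ih1
            rw [pv_foldl_cons_eq]
            simp [hFn, hcF]
          · have hcread' : pvRead vis' c = 0 := by
              have hcF' : c ∉ (pvNbr (ci, cj)).filter (fun q => decide (pvOk target vis tv N q)) := by
                rw [← hF]; exact hcF
              rw [hf3 c hcInR.1 hcInR.2.2.1, if_neg hcF']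
              exact hcread
            exact List.mem_cons_of_mem _ (ih2 c' h c hcnbr hcInR hct hcread')

def pvClosed (target : List (List Int)) (tv N : Int) (S : List (Int × Int))
    (vis : List (List Int)) : Prop :=
  ∀ c' ∈ S, ∀ c ∈ pvNbr c', pvInR N c → pvRead target c = tv → pvRead vis c = 0 → c ∈ S

-- every popped cell lies in any seed-containing set closed under admissible neighbours
theorem pvCellsA_subset (target : List (List Int)) (tv N : Int) (S : List (Int × Int)) :
    ∀ (fuel : Nat) (q : List (Int × Int)) (vis : List (List Int)), pvShape N vis →
      (∀ x ∈ q, x ∈ S) → pvClosed target tv N S vis →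
      ∀ x ∈ pvCellsA target tv N fuel q vis, x ∈ S := by
  intro fuel
  induction fuel with
  | zero => intro q vis _ _ _ x hx; simp [pvCellsA] at hx
  | succ n ih =>
    intro q vis hs hq hcl
    cases q with
    | nil => intro x hx; simp [pvCellsA] at hx
    | cons hd rest =>
      obtain ⟨ci, cj⟩ := hd
      intro x hx
      simp only [pvCellsA] at hx
      rw [pvGetNeighbors_eq_fold] at hx
      obtain ⟨hf1, hf2, hf3⟩ := pvMark_fold_spec target tv N (pvNbr (ci, cj)) (pvNbr_nodup _) [] vis hs
      simp only [List.nil_append] at hf1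
      set F := (pvNbr (ci, cj)).filter (fun q => decide (pvOk target vis tv N q)) with hF
      rcases List.mem_cons.mp hx with h | h
      · exact h ▸ hq _ List.mem_cons_self
      · apply ih _ _ hf2 _ _ _ h
        · intro y hy
          rw [pv_foldl_cons_eq, hf1] at hy
          rcases List.mem_append.mp hy with hyF | hyrest
          · have hyF' : y ∈ F := by simpa using hyF
            have hok := List.of_mem_filter hyF'
            simp only [decide_eq_true_eq] at hok
            exact hcl _ (hq _ List.mem_cons_self) y (List.mem_of_mem_filter hyF') hok.1 hok.2.2 hok.2.1
          · exact hq _ (List.mem_cons_of_mem _ hyrest)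
        · intro c' hc' c hcnbr hcInR hct hcread
          apply hcl c' hc' c hcnbr hcInR hct
          have hrd := hf3 c hcInR.1 hcInR.2.2.1
          rw [hrd] at hcread
          by_cases hcF : c ∈ F
          · simp [hcF] at hcread
          · rwa [if_neg hcF] at hcread

abbrev pvAdjR (region : List (Int × Int)) (p : Int × Int) : Prop :=
  (p.1 - 1, p.2) ∈ region ∨ (p.1 + 1, p.2) ∈ region ∨
  (p.1, p.2 - 1) ∈ region ∨ (p.1, p.2 + 1) ∈ region

def pvStepB (target : List (List Int)) (tv : Int)
    (st : List (Int × Int) × List (List Int) × Bool) (p : Int × Int) :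
    List (Int × Int) × List (List Int) × Bool :=
  pvCellStep target tv st p.1 p.2

theorem pvCellStep_char (target : List (List Int)) (tv : Int)
    (st : List (Int × Int) × List (List Int) × Bool) (r c : Int) :
    pvCellStep target tv st r c =
      if (r, c) ∉ st.1 ∧ pvRead st.2.1 (r, c) = 0 ∧ pvRead target (r, c) = tv ∧
          pvAdjR st.1 (r, c)
      then (st.1 ++ [(r, c)], pvSet2 st.2.1 r c 1, true) else st := by
  unfold pvCellStep pvAdjR pvRead
  dsimp only
  by_cases c1 : (r, c) ∈ st.1
  · rw [if_pos c1, if_neg (fun h => h.1 c1)]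
  · rw [if_neg c1]
    by_cases c2 : PySem.List.pyGetD (PySem.List.pyGetD st.2.1 r []) c 0 ≠ 0 ∨
        PySem.List.pyGetD (PySem.List.pyGetD target r []) c 0 ≠ tv
    · rw [if_pos c2, if_neg (fun h => by
        rcases c2 with h2 | h2
        · exact h2 h.2.1
        · exact h2 h.2.2.1)]
    · rw [if_neg c2]
      have c2a : PySem.List.pyGetD (PySem.List.pyGetD st.2.1 r []) c 0 = 0 := by
        by_contra h; exact c2 (Or.inl h)
      have c2b : PySem.List.pyGetD (PySem.List.pyGetD target r []) c 0 = tv := by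
        by_contra h; exact c2 (Or.inr h)
      by_cases c3 : (r - 1, c) ∈ st.1 ∨ (r + 1, c) ∈ st.1 ∨ (r, c - 1) ∈ st.1 ∨ (r, c + 1) ∈ st.1
      · rw [if_pos c3, if_pos ⟨c1, c2a, c2b, c3⟩]
      · rw [if_neg c3, if_neg (fun h => c3 h.2.2.2)]

theorem pvStepB_char (target : List (List Int)) (tv : Int)
    (st : List (Int × Int) × List (List Int) × Bool) (p : Int × Int) :
    pvStepB target tv st p =
      if p ∉ st.1 ∧ pvRead st.2.1 p = 0 ∧ pvRead target p = tv ∧ pvAdjR st.1 p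
      then (st.1 ++ [p], pvSet2 st.2.1 p.1 p.2 1, true) else st := by
  obtain ⟨r, c⟩ := p
  exact pvCellStep_char target tv st r c

theorem pvSweep_eq_fold (target : List (List Int)) (tv N : Int)
    (region : List (Int × Int)) (vis : List (List Int)) :
    pvSweep target tv N region vis = (pvGrid N).foldl (pvStepB target tv) (region, vis, false) := by
  unfold pvSweep pvGrid pvStepB
  rw [List.foldl_flatMap]
  simp only [List.foldl_map]

theorem pvStepB_grown (target : List (List Int)) (tv : Int)
    (st : List (Int × Int) × List (List Int) × Bool) (p : Int × Int)
    (h : st.2.2 = true) : (pvStepB target tv st p).2.2 = true := by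
  rw [pvStepB_char]
  split
  · rfl
  · exact h

theorem pv_fold_absorb (target : List (List Int)) (tv : Int) :
    ∀ (L : List (Int × Int)) (st : List (Int × Int) × List (List Int) × Bool),
      st.2.2 = true → (L.foldl (pvStepB target tv) st).2.2 = true := by
  intro L
  induction L with
  | nil => intro st h; exact h
  | cons p L' ih => intro st h; exact ih _ (pvStepB_grown target tv st p h)

theorem pv_fold_frozen (target : List (List Int)) (tv : Int) :
    ∀ (L : List (Int × Int)) (st : List (Int × Int) × List (List Int) × Bool),
      (L.foldl (pvStepB target tv) st).2.2 = false →
      L.foldl (pvStepB target tv) st = st ∧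
      (∀ p ∈ L, ¬ (p ∉ st.1 ∧ pvRead st.2.1 p = 0 ∧ pvRead target p = tv ∧ pvAdjR st.1 p)) := by
  intro L
  induction L with
  | nil => intro st _; exact ⟨rfl, by simp⟩
  | cons p L' ih =>
    intro st hfin
    rw [List.foldl_cons] at hfin
    by_cases hc : p ∉ st.1 ∧ pvRead st.2.1 p = 0 ∧ pvRead target p = tv ∧ pvAdjR st.1 p
    · exfalso
      have ht : (pvStepB target tv st p).2.2 = true := by rw [pvStepB_char, if_pos hc]
      have habs := pv_fold_absorb target tv L' _ ht
      rw [hfin] at habs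
      exact Bool.false_ne_true habs
    · have hst : pvStepB target tv st p = st := by rw [pvStepB_char, if_neg hc]
      rw [hst] at hfin
      obtain ⟨h1, h2⟩ := ih st hfin
      refine ⟨by rw [List.foldl_cons, hst, h1], ?_⟩
      intro q hq
      rcases List.mem_cons.mp hq with rfl | hq'
      · exact hc
      · exact h2 q hq'

-- invariant carried through B's sweeps: well-shaped visited, nodup seed-headed region of
-- in-range cells inside S, visited = vis1 off the region
def pvBInv (target : List (List Int)) (tv N : Int) (S : List (Int × Int))
    (vis1 : List (List Int)) (seed : Int × Int)
    (region : List (Int × Int)) (vis : List (List Int)) : Prop :=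
  pvShape N vis ∧ region.Nodup ∧ (∃ t, region = seed :: t) ∧
  (∀ c ∈ region, c = seed ∨ pvInR N c) ∧ (∀ c ∈ region, c ∈ S) ∧
  (∀ p : Int × Int, 0 ≤ p.1 → 0 ≤ p.2 → p ∉ region → pvRead vis p = pvRead vis1 p)

theorem pv_adj_nbr {region : List (Int × Int)} {p : Int × Int} (h : pvAdjR region p) :
    ∃ q ∈ region, p ∈ pvNbr q := by
  rcases h with h | h | h | h
  · exact ⟨_, h, by simp [pvNbr]⟩
  · exact ⟨_, h, by simp [pvNbr]⟩
  · exact ⟨_, h, by simp [pvNbr]⟩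
  · exact ⟨_, h, by simp [pvNbr]⟩

theorem pv_nbr_adj {c' c : Int × Int} (h : c ∈ pvNbr c') {region : List (Int × Int)}
    (hc' : c' ∈ region) : pvAdjR region c := by
  simp only [pvNbr, List.mem_cons, List.not_mem_nil, or_false] at h
  unfold pvAdjR
  rcases h with h | h | h | h <;> subst h <;> dsimp only
  · right; left
    rw [show (c'.1 - 1 + 1 : Int) = c'.1 by ring]
    simpa using hc'
  · right; right; right
    rw [show (c'.2 - 1 + 1 : Int) = c'.2 by ring]
    simpa using hc'
  · left
    rw [show (c'.1 + 1 - 1 : Int) = c'.1 by ring]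
    simpa using hc'
  · right; right; left
    rw [show (c'.2 + 1 - 1 : Int) = c'.2 by ring]
    simpa using hc'

theorem pvSweep_fold_inv (target : List (List Int)) (tv N : Int) (S : List (Int × Int))
    (vis1 : List (List Int)) (seed : Int × Int)
    (hclosed : pvClosed target tv N S vis1) :
    ∀ (L : List (Int × Int)), (∀ p ∈ L, pvInR N p) →
    ∀ (region : List (Int × Int)) (vis : List (List Int)) (g : Bool),
      pvBInv target tv N S vis1 seed region vis →
      pvBInv target tv N S vis1 seed (L.foldl (pvStepB target tv) (region, vis, g)).1
        (L.foldl (pvStepB target tv) (region, vis, g)).2.1 ∧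
      region.length ≤ (L.foldl (pvStepB target tv) (region, vis, g)).1.length ∧
      ((L.foldl (pvStepB target tv) (region, vis, g)).2.2 = g ∨
        region.length < (L.foldl (pvStepB target tv) (region, vis, g)).1.length) := by
  intro L
  induction L with
  | nil => intro _ region vis g hInv; exact ⟨hInv, le_refl _, Or.inl rfl⟩
  | cons p L' ih =>
    intro hL region vis g hInv
    obtain ⟨hsh, hnd, ⟨t0, hhead⟩, hmem, hsub, hoff⟩ := hInv
    have hpInR : pvInR N p := hL p List.mem_cons_self
    rw [List.foldl_cons]
    by_cases hc : p ∉ region ∧ pvRead vis p = 0 ∧ pvRead target p = tv ∧ pvAdjR region p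
    · have hstep : pvStepB target tv (region, vis, g) p
          = (region ++ [p], pvSet2 vis p.1 p.2 1, true) := by rw [pvStepB_char, if_pos hc]
      obtain ⟨hcnm, hcread, hct, hcadj⟩ := hc
      have hpS : p ∈ S := by
        obtain ⟨q, hq, hpn⟩ := pv_adj_nbr hcadj
        exact hclosed q (hsub q hq) p hpn hpInR hct
          (by rw [← hoff p hpInR.1 hpInR.2.2.1 hcnm]; exact hcread)
      have hInv' : pvBInv target tv N S vis1 seed (region ++ [p]) (pvSet2 vis p.1 p.2 1) := by
        refine ⟨pvShape_pvSet2 hsh _ _ _, ?_, ⟨t0 ++ [p], by rw [hhead]; simp⟩, ?_, ?_, ?_⟩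
        · simp only [List.nodup_append, List.nodup_singleton, true_and]
          refine ⟨hnd, ?_⟩
          intro a ha b hb hEq
          have hbp : b = p := by simpa using hb
          apply hcnm
          rw [← hbp, ← hEq]
          exact ha
        · intro c hcm
          rcases List.mem_append.mp hcm with h | h
          · exact hmem c h
          · right; rw [List.mem_singleton.mp h]; exact hpInR
        · intro c hcm
          rcases List.mem_append.mp hcm with h | h
          · exact hsub c h
          · rw [List.mem_singleton.mp h]; exact hpS
        · intro q hq1 hq2 hqnm
          have hqp : q ≠ p := fun h => hqnm (by rw [h]; simp)
          have hqr : q ∉ region := fun h => hqnm (by simp [h])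
          rw [pvRead_pvSet2 hsh hpInR 1 q hq1 hq2, if_neg hqp]
          exact hoff q hq1 hq2 hqr
      rw [hstep]
      obtain ⟨ih1, ih2, _⟩ := ih (fun q hq => hL q (List.mem_cons_of_mem _ hq)) _ _ true hInv'
      refine ⟨ih1, ?_, Or.inr ?_⟩ <;> simp only [List.length_append, List.length_cons] at ih2 ⊢ <;> omega
    · have hstep : pvStepB target tv (region, vis, g) p = (region, vis, g) := by
        rw [pvStepB_char, if_neg hc]
      rw [hstep]
      exact ih (fun q hq => hL q (List.mem_cons_of_mem _ hq)) _ _ g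
        ⟨hsh, hnd, ⟨t0, hhead⟩, hmem, hsub, hoff⟩

theorem pv_nodup_length_le {α : Type} [DecidableEq α] (l l' : List α)
    (hnd : l.Nodup) (hsub : ∀ x ∈ l, x ∈ l') : l.length ≤ l'.length := by
  calc l.length = l.toFinset.card := (List.toFinset_card_of_nodup hnd).symm
    _ ≤ l'.toFinset.card := Finset.card_le_card (fun x hx => by
        rw [List.mem_toFinset] at *
        exact hsub x (by simpa using hx))
    _ ≤ l'.length := List.toFinset_card_le l'

theorem pvFixB_spec (target : List (List Int)) (tv N : Int) (S : List (Int × Int))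
    (vis1 : List (List Int)) (seed : Int × Int)
    (_hseed : seed ∈ S) (hclosed : pvClosed target tv N S vis1) :
    ∀ (fuel : Nat) (region : List (Int × Int)) (vis : List (List Int)),
      pvBInv target tv N S vis1 seed region vis →
      N.toNat * N.toNat + 2 ≤ fuel + region.length →
      (∃ t, pvFixB target tv N fuel region vis = seed :: t) ∧
      (∀ c ∈ pvFixB target tv N fuel region vis, c ∈ S) ∧
      pvClosed target tv N (pvFixB target tv N fuel region vis) vis1 := by
  intro fuel
  induction fuel with
  | zero =>
    intro region vis hInv hfuel
    exfalso
    obtain ⟨_, hnd, _, hmem, _, _⟩ := hInv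
    have hle : region.length ≤ (seed :: pvGrid N).length := by
      apply pv_nodup_length_le _ _ hnd
      intro x hx
      rcases hmem x hx with h | h
      · simp [h]
      · exact List.mem_cons_of_mem _ ((pv_mem_grid N x).mpr h)
    rw [List.length_cons, pv_grid_length] at hle
    omega
  | succ n ih =>
    intro region vis hInv hfuel
    have hgridR : ∀ p ∈ pvGrid N, pvInR N p := fun p hp => (pv_mem_grid N p).mp hp
    have hsw := pvSweep_fold_inv target tv N S vis1 seed hclosed (pvGrid N) hgridR
      region vis false hInv
    rw [← pvSweep_eq_fold] at hsw
    obtain ⟨hInv', hlen, hdisj⟩ := hsw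
    show _ ∧ _ ∧ _
    unfold pvFixB
    cases hg : (pvSweep target tv N region vis).2.2 with
    | true =>
      simp only [hg, if_true]
      apply ih _ _ hInv'
      rcases hdisj with h | h
      · rw [hg] at h; exact absurd h (by simp)
      · omega
    | false =>
      simp only [hg]
      -- the sweep changed nothing: region is a fixpoint
      have hfr := pv_fold_frozen target tv (pvGrid N) (region, vis, false)
        (by rw [← pvSweep_eq_fold]; exact hg)
      rw [← pvSweep_eq_fold] at hfr
      obtain ⟨hfix, hrej⟩ := hfr
      rw [hfix]
      obtain ⟨hsh, hnd, hhead, hmem, hsub, hoff⟩ := hInv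
      refine ⟨hhead, hsub, ?_⟩
      intro c' hc' c hcnbr hcInR hct hcread
      by_cases hcr : c ∈ region
      · exact hcr
      · exfalso
        apply hrej c ((pv_mem_grid N c).mpr hcInR)
      --  region and vis are the first two components of the frozen state
        refine ⟨hcr, ?_, hct, pv_nbr_adj hcnbr hc'⟩
        rw [hoff c hcInR.1 hcInR.2.2.1 hcr]
        exact hcread

theorem pv_foldl_min_le_init : ∀ (l : List Int) (a : Int), l.foldl min a ≤ a := by
  intro l
  induction l with
  | nil => intro a; simp
  | cons x t ih => intro a; exact le_trans (ih (min a x)) (min_le_left a x)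

theorem pv_foldl_min_le_mem : ∀ (l : List Int) (a x : Int), x ∈ l → l.foldl min a ≤ x := by
  intro l
  induction l with
  | nil => intro a x hx; simp at hx
  | cons y t ih =>
    intro a x hx
    rcases List.mem_cons.mp hx with rfl | hx
    · exact le_trans (pv_foldl_min_le_init t (min a x)) (min_le_right a x)
    · exact ih (min a y) x hx

theorem pv_foldl_min_choice : ∀ (l : List Int) (a : Int), l.foldl min a = a ∨ l.foldl min a ∈ l := by
  intro l
  induction l with
  | nil => intro a; simp
  | cons y t ih =>
    intro a
    rcases ih (min a y) with h | h
    · rcases min_choice a y with h' | h'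
      · left; rw [List.foldl_cons, h, h']
      · right; rw [List.foldl_cons, h, h']; exact List.mem_cons_self
    · right; exact List.mem_cons_of_mem _ h

theorem pv_foldl_min_congr (l₁ l₂ : List Int) (a : Int) (h : ∀ x, x ∈ l₁ ↔ x ∈ l₂) :
    l₁.foldl min a = l₂.foldl min a := by
  apply le_antisymm
  · rcases pv_foldl_min_choice l₂ a with h' | h'
    · rw [h']; exact pv_foldl_min_le_init l₁ a
    · exact pv_foldl_min_le_mem l₁ a _ ((h _).mpr h')
  · rcases pv_foldl_min_choice l₁ a with h' | h'
    · rw [h']; exact pv_foldl_min_le_init l₂ a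
    · exact pv_foldl_min_le_mem l₂ a _ ((h _).mp h')

theorem pv_foldl_max_le_init : ∀ (l : List Int) (a : Int), a ≤ l.foldl max a := by
  intro l
  induction l with
  | nil => intro a; simp
  | cons x t ih => intro a; exact le_trans (le_max_left a x) (ih (max a x))

theorem pv_foldl_max_le_mem : ∀ (l : List Int) (a x : Int), x ∈ l → x ≤ l.foldl max a := by
  intro l
  induction l with
  | nil => intro a x hx; simp at hx
  | cons y t ih =>
    intro a x hx
    rcases List.mem_cons.mp hx with rfl | hx
    · exact le_trans (le_max_right a x) (pv_foldl_max_le_init t (max a x))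
    · exact ih (max a y) x hx

theorem pv_foldl_max_choice : ∀ (l : List Int) (a : Int), l.foldl max a = a ∨ l.foldl max a ∈ l := by
  intro l
  induction l with
  | nil => intro a; simp
  | cons y t ih =>
    intro a
    rcases ih (max a y) with h | h
    · rcases max_choice a y with h' | h'
      · left; rw [List.foldl_cons, h, h']
      · right; rw [List.foldl_cons, h, h']; exact List.mem_cons_self
    · right; exact List.mem_cons_of_mem _ h

theorem pv_foldl_max_congr (l₁ l₂ : List Int) (a : Int) (h : ∀ x, x ∈ l₁ ↔ x ∈ l₂) :
    l₁.foldl max a = l₂.foldl max a := by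
  apply le_antisymm
  · rcases pv_foldl_max_choice l₁ a with h' | h'
    · rw [h']; exact pv_foldl_max_le_init l₂ a
    · exact pv_foldl_max_le_mem l₂ a _ ((h _).mp h')
  · rcases pv_foldl_max_choice l₂ a with h' | h'
    · rw [h']; exact pv_foldl_max_le_init l₁ a
    · exact pv_foldl_max_le_mem l₁ a _ ((h _).mpr h')

theorem pv_pre_shape (N : Int) (vis : List (List Int)) (h1 : N ≤ (vis.length : Int))
    (h2 : ∀ row ∈ vis.take N.toNat, N ≤ (row.length : Int)) : pvShape N vis := by
  refine ⟨h1, ?_⟩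
  intro k hk
  have hkl : k < vis.length := by omega
  have hgd : vis.getD k [] = vis[k] := by
    rw [List.getD_eq_getElem?_getD, List.getElem?_eq_getElem hkl]; rfl
  rw [hgd]
  apply h2
  have hkt : k < (vis.take N.toNat).length := by
    rw [List.length_take]; omega
  have : (vis.take N.toNat)[k] = vis[k] := List.getElem_take
  rw [← this]
  exact List.getElem_mem hkt

theorem pv_main (i j : Int) (visited target : List (List Int)) (tv N : Int)
    (hshv : pvShape N visited) :
    get_curr_min_max_size i j visited target tv N
      = get_curr_min_max_size_alt i j visited target tv N := by
  unfold get_curr_min_max_size get_curr_min_max_size_alt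
  set vis1 := pvSet2 visited i j 1 with hvis1
  have hsh1 : pvShape N vis1 := pvShape_pvSet2 hshv i j 1
  rw [pvLoopA_eq_fold, pvFold_split]
  set fuel := N.toNat * N.toNat + 1 with hfuel
  set P := pvCellsA target tv N fuel [(i, j)] vis1 with hP
  set R := pvFixB target tv N fuel [(i, j)] vis1 with hR
  have hmu : pvMu N [(i, j)] vis1 ≤ fuel := by
    unfold pvMu
    have hfl := List.length_filter_le (fun p => pvRead vis1 p == 0) (pvGrid N)
    have hgl := pv_grid_length N
    simp only [List.length_cons, List.length_nil]
    omega
  obtain ⟨hAin, hAcl⟩ := pvCellsA_spec target tv N fuel [(i, j)] vis1 hsh1 hmu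
  have hseedP : (i, j) ∈ P := hAin _ List.mem_cons_self
  have hPcl : pvClosed target tv N P vis1 := hAcl
  have hInv0 : pvBInv target tv N P vis1 (i, j) [(i, j)] vis1 :=
    ⟨hsh1, List.nodup_singleton _, ⟨[], rfl⟩,
     fun c hc => Or.inl (List.mem_singleton.mp hc),
     fun c hc => by rw [List.mem_singleton.mp hc]; exact hseedP,
     fun p _ _ _ => rfl⟩
  obtain ⟨⟨t, hRt⟩, hRsub, hRcl⟩ := pvFixB_spec target tv N P vis1 (i, j) hseedP hPcl
    fuel [(i, j)] vis1 hInv0 (by simp only [List.length_cons, List.length_nil, hfuel]; omega)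
  rw [← hR] at hRt hRsub hRcl
  have hseedR : (i, j) ∈ R := by rw [hRt]; exact List.mem_cons_self
  have hPsubR : ∀ x ∈ P, x ∈ R :=
    pvCellsA_subset target tv N R fuel [(i, j)] vis1 hsh1
      (fun x hx => by rw [List.mem_singleton.mp hx]; exact hseedR) hRcl
  have hiff : ∀ x, x ∈ P ↔ x ∈ R := fun x => ⟨hPsubR x, hRsub x⟩
  dsimp only
  rw [← hR, hRt]
  simp only [List.map_cons, PySem.List.min?_id_cons, PySem.List.max?_id_cons, Option.getD_some]
  have hiff1 : ∀ x, x ∈ P.map (fun e => e.1) ↔ x ∈ ((i, j) :: t).map (fun c => c.1) := by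
    intro x
    simp only [List.mem_map]
    constructor
    · rintro ⟨e, he, rfl⟩; exact ⟨e, by rw [← hRt]; exact (hiff e).mp he, rfl⟩
    · rintro ⟨e, he, rfl⟩; exact ⟨e, (hiff e).mpr (by rw [hRt]; exact he), rfl⟩
  have hiff2 : ∀ x, x ∈ P.map (fun e => e.2) ↔ x ∈ ((i, j) :: t).map (fun c => c.2) := by
    intro x
    simp only [List.mem_map]
    constructor
    · rintro ⟨e, he, rfl⟩; exact ⟨e, by rw [← hRt]; exact (hiff e).mp he, rfl⟩
    · rintro ⟨e, he, rfl⟩; exact ⟨e, (hiff e).mpr (by rw [hRt]; exact he), rfl⟩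
  simp only [Prod.mk.injEq]
  refine ⟨?_, ?_, ?_, ?_⟩
  · rw [pv_foldl_min_congr _ _ i hiff1]
    simp only [List.map_cons, List.foldl_cons, min_self]
  · rw [pv_foldl_min_congr _ _ j hiff2]
    simp only [List.map_cons, List.foldl_cons, min_self]
  · rw [pv_foldl_max_congr _ _ i hiff1]
    simp only [List.map_cons, List.foldl_cons, max_self]
  · rw [pv_foldl_max_congr _ _ j hiff2]
    simp only [List.map_cons, List.foldl_cons, max_self]


-- ===== VERDICT (by name: the statement is the Claim_ definition above) =====
theorem get_curr_min_max_size_spec : Claim_equal_get_curr_min_max_size := by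
  intro i j visited target target_value N _ hpre
  unfold Spec_get_curr_min_max_size
  exact pv_main i j visited target target_value N
    (pv_pre_shape N visited hpre.2.1 hpre.2.2.2.1)
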